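-- pv_equiv track=rewrite | github.com/RatherRude/Elite-Dangerous-AI-Integration | src/lib/GenUI.py | _initialize_component_collection
-- ===== SOURCE A (Python) =====
-- GENUI_COMPONENT_START = "// COMPONENT:"
--
-- GENUI_COMPONENT_END = "// END COMPONENT:"
--
-- def _initialize_component_collection(current_code: str) -> dict[str, str]:
--     parsed_components: dict[str, str] = {}
--     current_component_name: str | None = None
--     current_component_lines: list[str] = []
--
--     for line in current_code.splitlines():
--         stripped = line.strip()
--         if stripped.startswith(GENUI_COMPONENT_START):
--             if current_component_name is not None:
--                 return {"App": current_code}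
--             current_component_name = stripped[len(GENUI_COMPONENT_START):].strip()
--             current_component_lines = []
--             continue
--
--         if stripped.startswith(GENUI_COMPONENT_END):
--             end_component_name = stripped[len(GENUI_COMPONENT_END):].strip()
--             if current_component_name is None or end_component_name != current_component_name:
--                 return {"App": current_code}
--             parsed_components[current_component_name] = "\n".join(current_component_lines).strip()
--             current_component_name = None
--             current_component_lines = []
--             continue
--
--         if current_component_name is not None:
--             current_component_lines.append(line)
--
--     if current_component_name is not None:
--         return {"App": current_code}
--
--     if parsed_components:
--         return parsed_components
--
--     return {
--         "App": current_code,
--     }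
-- ===== SOURCE B (Python) =====
-- GENUI_COMPONENT_START = "// COMPONENT:"
-- GENUI_COMPONENT_END = "// END COMPONENT:"
--
-- def _initialize_component_collection(current_code: str) -> dict[str, str]:
--     lines = current_code.splitlines()
--     # pass 1: collect marker events (index, is_start, name)
--     events = []
--     for i, line in enumerate(lines):
--         stripped = line.strip()
--         if stripped.startswith(GENUI_COMPONENT_START):
--             events.append((i, True, stripped[len(GENUI_COMPONENT_START):].strip()))
--         elif stripped.startswith(GENUI_COMPONENT_END):
--             events.append((i, False, stripped[len(GENUI_COMPONENT_END):].strip()))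
--     # pass 2: events must be a strict alternation START(n)/END(n); slice bodies out
--     if len(events) % 2 != 0:
--         return {"App": current_code}
--     result: dict[str, str] = {}
--     for k in range(0, len(events), 2):
--         i, is_start, start_name = events[k]
--         j, is_start2, end_name = events[k + 1]
--         if not is_start or is_start2 or start_name != end_name:
--             return {"App": current_code}
--         result[start_name] = "\n".join(lines[i + 1:j]).strip()
--     if not result:
--         return {"App": current_code}
--     return result
-- ===== Notes on version B (the rewrite author's own statement) =====
-- stated objective: alternative
-- what changed: Replaces A's single stateful loop (open-component name + accumulated body lines) with two passes: pass 1 collects marker events (line index, start/end, name) from the enumerated lines, pass 2 validates that the events strictly alternate START(n)/END(n) and slices each component body out of the line list.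
import Mathlib
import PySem

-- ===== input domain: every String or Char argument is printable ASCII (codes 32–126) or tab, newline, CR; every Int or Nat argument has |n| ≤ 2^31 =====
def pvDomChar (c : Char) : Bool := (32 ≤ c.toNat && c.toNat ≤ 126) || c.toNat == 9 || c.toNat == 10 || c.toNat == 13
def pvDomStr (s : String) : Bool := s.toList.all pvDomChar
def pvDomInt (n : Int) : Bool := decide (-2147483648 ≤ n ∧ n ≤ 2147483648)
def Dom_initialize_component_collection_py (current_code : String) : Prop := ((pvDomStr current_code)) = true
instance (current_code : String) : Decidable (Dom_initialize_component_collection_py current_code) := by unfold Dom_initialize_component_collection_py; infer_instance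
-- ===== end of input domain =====

-- B replaces A's single stateful accumulator loop with two passes — collect marker
-- events, then validate the alternation and slice each body out of the line list —
-- as an alternative decomposition of the same parse (same cost).

-- ===== PORT A =====
def pvGenuiStart : String := "// COMPONENT:"

def pvGenuiEnd : String := "// END COMPONENT:"

/-- A's loop over the lines; `none` = an early `return {"App": current_code}`,
`some (pc, cur)` = the final state after the loop. -/
def pvALoop : List String → PySem.Dict String String → Option String → List String →
    Option (PySem.Dict String String × Option String)
  | [], pc, cur, _ => some (pc, cur)
  | line :: rest, pc, cur, body =>
    let stripped := PySem.Str.strip line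
    if PySem.Str.startswith stripped pvGenuiStart then
      match cur with
      | some _ => none
      | none =>
        pvALoop rest pc
          (some (PySem.Str.strip (PySem.Str.slice stripped (some (PySem.Str.len pvGenuiStart)) none))) []
    else if PySem.Str.startswith stripped pvGenuiEnd then
      let endName := PySem.Str.strip (PySem.Str.slice stripped (some (PySem.Str.len pvGenuiEnd)) none)
      match cur with
      | none => none
      | some n =>
        if endName ≠ n then none
        else pvALoop rest (pc.insert n (PySem.Str.strip (PySem.Str.join "\n" body))) none []
    else
      if cur.isSome then pvALoop rest pc cur (body ++ [line])
      else pvALoop rest pc cur body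

def initialize_component_collection_py (current_code : String) : List (String × String) :=
  match pvALoop (PySem.Str.splitlines current_code) PySem.Dict.empty none [] with
  | none => [("App", current_code)]
  | some (_, some _) => [("App", current_code)]
  | some (pc, none) => if pc.items.isEmpty then [("App", current_code)] else pc.items

-- ===== PORT B =====
/-- B's pass 1 body: classify one enumerated line as a START/END marker event or nothing. -/
def pvClassify (i : Int) (line : String) : Option (Int × Bool × String) :=
  let stripped := PySem.Str.strip line
  if PySem.Str.startswith stripped pvGenuiStart then
    some (i, true, PySem.Str.strip (PySem.Str.slice stripped (some (PySem.Str.len pvGenuiStart)) none))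
  else if PySem.Str.startswith stripped pvGenuiEnd then
    some (i, false, PySem.Str.strip (PySem.Str.slice stripped (some (PySem.Str.len pvGenuiEnd)) none))
  else none

/-- B's pass 2: consume events two at a time; `none` = an early `return {"App": current_code}`. -/
def pvBPair (lines : List String) :
    List (Int × Bool × String) → PySem.Dict String String → Option (PySem.Dict String String)
  | [], acc => some acc
  | [_], _ => none
  | (i, isStart, startName) :: (j, isStart2, endName) :: rest, acc =>
    if !isStart || isStart2 || startName ≠ endName then none
    else
      pvBPair lines rest
        (acc.insert startName
          (PySem.Str.strip (PySem.Str.join "\n" (PySem.List.slice lines (some (i + 1)) (some j)))))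

def initialize_component_collection_py_alt (current_code : String) : List (String × String) :=
  let lines := PySem.Str.splitlines current_code
  let events := (PySem.List.enumerate lines).filterMap (fun p => pvClassify p.1 p.2)
  if events.length % 2 ≠ 0 then [("App", current_code)]
  else
    match pvBPair lines events PySem.Dict.empty with
    | none => [("App", current_code)]
    | some res => if res.items.isEmpty then [("App", current_code)] else res.items

-- ===== PRECONDITION & SPEC =====
def Spec_initialize_component_collection_py (current_code : String) (out : List (String × String)) : Prop := out = initialize_component_collection_py_alt current_code
instance (current_code : String) (out : List (String × String)) : Decidable (Spec_initialize_component_collection_py current_code out) := by unfold Spec_initialize_component_collection_py; infer_instance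

-- ===== CLAIM (what is proved, stated in full; the proofs are below) =====
def Claim_equal_initialize_component_collection_py : Prop := ∀ (current_code : String), Dom_initialize_component_collection_py current_code → Spec_initialize_component_collection_py current_code (initialize_component_collection_py current_code)

-- ===== LEMMAS AND PROOFS =====

/-- Collapse A's loop result: `some pc` only when the loop finished with no open component. -/
def pvACollapse (r : Option (PySem.Dict String String × Option String)) :
    Option (PySem.Dict String String) :=
  match r with
  | some (pc, none) => some pc
  | _ => none

/-- B's events for the suffix of `L` starting at line `k`. -/
def pvEvFrom (k : Int) (ls : List String) : List (Int × Bool × String) :=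
  (PySem.List.enumerate ls k).filterMap (fun p => pvClassify p.1 p.2)

theorem pvEvFrom_nil (k : Int) : pvEvFrom k [] = [] := rfl

theorem pvEvFrom_cons (k : Int) (l : String) (ls : List String) :
    pvEvFrom k (l :: ls) =
      (match pvClassify k l with
       | some e => e :: pvEvFrom (k + 1) ls
       | none => pvEvFrom (k + 1) ls) := by
  simp only [pvEvFrom, PySem.List.enumerate_cons, List.filterMap_cons]
  cases pvClassify k l <;> simp

theorem pvBPair_end_head (lines : List String) (i : Int) (n : String)
    (evs : List (Int × Bool × String)) (acc : PySem.Dict String String) :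
    pvBPair lines ((i, false, n) :: evs) acc = none := by
  cases evs with
  | nil => rfl
  | cons e rest => simp [pvBPair]

theorem pvBPair_odd (lines : List String) :
    ∀ (evs : List (Int × Bool × String)) (acc : PySem.Dict String String),
      evs.length % 2 = 1 → pvBPair lines evs acc = none
  | [], _, h => by simp at h
  | [_], _, _ => rfl
  | (i, isStart, startName) :: (j, isStart2, endName) :: rest, acc, h => by
    simp only [pvBPair]
    split
    · rfl
    · exact pvBPair_odd lines rest _ (by simp only [List.length_cons] at h; omega)

/-- The pending state of A's loop: `none` = no open component; `some (n, i)` = a component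
named `n` was opened by the marker at line `i`. -/
def pvInvariant (L : List String) (k : Nat) (pc : PySem.Dict String String)
    (st : Option (String × Nat)) : Prop :=
  match st with
  | none =>
      pvACollapse (pvALoop (L.drop k) pc none []) = pvBPair L (pvEvFrom k (L.drop k)) pc
  | some (n, i) =>
      i + 1 ≤ k →
      pvACollapse (pvALoop (L.drop k) pc (some n) ((L.drop (i + 1)).take (k - (i + 1)))) =
        pvBPair L (((i : Int), true, n) :: pvEvFrom k (L.drop k)) pc

theorem pvMain (L : List String) (ls : List String) :
    ∀ (k : Nat) (pc : PySem.Dict String String) (st : Option (String × Nat)),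
      ls = L.drop k → pvInvariant L k pc st := by
  induction ls with
  | nil =>
    intro k pc st h
    cases st with
    | none => simp [pvInvariant, ← h, pvALoop, pvACollapse, pvEvFrom_nil, pvBPair]
    | some p =>
      obtain ⟨n, i⟩ := p
      intro _
      simp [← h, pvALoop, pvACollapse, pvEvFrom_nil, pvBPair]
  | cons line rest ih =>
    intro k pc st h
    have hrest : rest = L.drop (k + 1) := by
      have := congrArg List.tail h
      simpa [List.tail_drop] using this
    have hline : L[k]? = some line := by
      have : (L.drop k)[0]? = some line := by rw [← h]; rfl
      simpa using this
    have hcast : ((k : Int) + 1) = (((k + 1 : Nat)) : Int) := by push_cast; ring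
    cases st with
    | none =>
      show pvACollapse (pvALoop (L.drop k) pc none []) = pvBPair L (pvEvFrom k (L.drop k)) pc
      rw [← h, pvEvFrom_cons, hcast, hrest]
      simp only [pvALoop, pvClassify]
      split
      · -- START marker
        have ihS := ih (k + 1) pc (some (PySem.Str.strip (PySem.Str.slice (PySem.Str.strip line) (some (PySem.Str.len pvGenuiStart)) none), k)) hrest
        simp only [pvInvariant] at ihS
        have := ihS (by omega)
        simpa [Nat.sub_self] using this
      · split
        · -- END marker while closed
          rw [pvBPair_end_head]
          rfl
        · -- ordinary line
          have ihN := ih (k + 1) pc none hrest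
          simp only [pvInvariant] at ihN
          simpa using ihN
    | some p =>
      obtain ⟨n, i⟩ := p
      intro hik
      show pvACollapse (pvALoop (L.drop k) pc (some n) ((L.drop (i + 1)).take (k - (i + 1)))) =
        pvBPair L (((i : Int), true, n) :: pvEvFrom k (L.drop k)) pc
      rw [← h, pvEvFrom_cons, hcast, hrest]
      simp only [pvALoop, pvClassify]
      split
      · -- START while open: both fail
        simp [pvACollapse, pvBPair]
      · split
        · -- END marker
          by_cases hname :
              PySem.Str.strip (PySem.Str.slice (PySem.Str.strip line) (some (PySem.Str.len pvGenuiEnd)) none) = n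
          · -- names match: close the component
            have hslice : PySem.List.slice L (some ((i : Int) + 1)) (some (k : Int)) =
                (L.drop (i + 1)).take (k - (i + 1)) := by
              have := PySem.List.slice_natCast L (i + 1) k
              push_cast at this
              exact this
            have ihN := ih (k + 1)
              (pc.insert n (PySem.Str.strip (PySem.Str.join "\n" ((L.drop (i + 1)).take (k - (i + 1)))))) none hrest
            simp only [pvInvariant] at ihN
            rw [if_neg (by simpa using hname)]
            simp only [pvBPair, hname]
            rw [if_neg (by simp), hslice]
            exact ihN
          · -- names differ: both fail
            rw [if_pos (by simpa using hname)]
            simp only [pvBPair]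
            rw [if_pos (by simpa using Ne.symm hname)]
            rfl
        · -- ordinary line inside the component
          have hbody : (L.drop (i + 1)).take (k - (i + 1)) ++ [line] =
              (L.drop (i + 1)).take (k + 1 - (i + 1)) := by
            have hk1 : k + 1 - (i + 1) = (k - (i + 1)) + 1 := by omega
            rw [hk1, List.take_add_one]
            have : (L.drop (i + 1))[k - (i + 1)]? = some line := by
              rw [List.getElem?_drop]
              have : i + 1 + (k - (i + 1)) = k := by omega
              rw [this, hline]
            simp [this]
          have ihS := ih (k + 1) pc (some (n, i)) hrest
          simp only [pvInvariant] at ihS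
          have := ihS (by omega)
          simp only [Option.isSome_some, if_pos]
          rw [hbody]
          simpa using this

-- ===== VERDICT (by name: the statement is the Claim_ definition above) =====
theorem initialize_component_collection_py_spec : Claim_equal_initialize_component_collection_py := by
  intro code _
  show initialize_component_collection_py code = initialize_component_collection_py_alt code
  simp only [initialize_component_collection_py, initialize_component_collection_py_alt]
  have hmain := pvMain (PySem.Str.splitlines code) (PySem.Str.splitlines code) 0
    PySem.Dict.empty none rfl
  simp only [pvInvariant, List.drop_zero, Nat.cast_zero] at hmain
  have hev0 : pvEvFrom 0 (PySem.Str.splitlines code) =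
      (PySem.List.enumerate (PySem.Str.splitlines code)).filterMap (fun p => pvClassify p.1 p.2) := rfl
  rw [hev0] at hmain
  by_cases hpar : ((PySem.List.enumerate (PySem.Str.splitlines code)).filterMap
      (fun p => pvClassify p.1 p.2)).length % 2 = 0
  · rw [if_neg (fun hc => hc hpar), ← hmain]
    cases hA : pvALoop (PySem.Str.splitlines code) PySem.Dict.empty none [] with
    | none => rfl
    | some r =>
      obtain ⟨pc, cur⟩ := r
      cases cur <;> rfl
  · have hodd : ((PySem.List.enumerate (PySem.Str.splitlines code)).filterMap
        (fun p => pvClassify p.1 p.2)).length % 2 = 1 := by omega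
    rw [if_pos (by omega)]
    rw [pvBPair_odd _ _ _ hodd] at hmain
    cases hA : pvALoop (PySem.Str.splitlines code) PySem.Dict.empty none [] with
    | none => rfl
    | some r =>
      obtain ⟨pc, cur⟩ := r
      cases cur with
      | none => rw [hA] at hmain; exact absurd hmain (by simp [pvACollapse])
      | some nm => rfl
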